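-- pv_equiv track=rewrite | github.com/Hepaul7/CCGparser | pmb-5.1.0/src/ccg/get_lexicons.py | remove_features
-- ===== SOURCE A (Python) =====
-- def remove_features(input_str):
--     result = []
--     i = 0
--     while i < len(input_str):
--         if input_str[i:i+2] == "s:":
--             # Add just "s" and skip over the feature part until we hit a '/' or ')'
--             result.append("s")
--             i += 2  # Skip over "s:"
--             while i < len(input_str) and input_str[i] not in ['/','(',')', '\\']:
--                 i += 1
--         else:
--             result.append(input_str[i])
--             i += 1
--     return ''.join(result)
-- ===== SOURCE B (Python) =====
-- import re
--
-- def remove_features(input_str):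
--     # One global regex substitution: "s:" plus the maximal following run of
--     # non-delimiter characters collapses to "s".
--     return re.sub(r's:[^/()\\]*', 's', input_str)
-- ===== Notes on version B (the rewrite author's own statement) =====
-- stated objective: faster
-- what changed: Replaced the hand-written index-walking loop with nested skip-while by a single global regex substitution (re.sub with the char class [^/()\\] mirroring the delimiter set), which runs in C instead of per-character Python bytecode.
import Mathlib
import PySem

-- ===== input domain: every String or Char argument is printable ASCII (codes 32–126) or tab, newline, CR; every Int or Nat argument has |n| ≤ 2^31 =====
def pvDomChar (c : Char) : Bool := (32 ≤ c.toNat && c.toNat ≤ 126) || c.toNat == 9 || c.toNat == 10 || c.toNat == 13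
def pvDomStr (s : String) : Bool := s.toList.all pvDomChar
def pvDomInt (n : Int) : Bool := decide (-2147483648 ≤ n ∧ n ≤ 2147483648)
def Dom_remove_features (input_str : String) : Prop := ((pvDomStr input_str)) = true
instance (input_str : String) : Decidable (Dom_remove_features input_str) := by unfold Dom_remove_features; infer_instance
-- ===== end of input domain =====

-- B replaces A's hand-written index loop by one global regex substitution (idiomatic); exact equivalence proved.


-- the delimiter set ['/','(',')','\\'] shared by A's membership test and B's regex char class
def rfDelim (c : Char) : Bool := c = '/' || c = '(' || c = ')' || c = '\\'

-- ===== PORT A =====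
-- inner while: `while i < len(s) and s[i] not in ['/','(',')','\\']: i += 1` — returns the new i
def rfA_skip (cs : List Char) (i : Nat) : Nat :=
  if h : i < cs.length then
    if rfDelim cs[i] then i
    else rfA_skip cs (i + 1)
  else i
termination_by cs.length - i

theorem rfA_skip_ge (cs : List Char) (i : Nat) : i ≤ rfA_skip cs i := by
  induction i using rfA_skip.induct cs with
  | case1 i h hc => rw [rfA_skip]; simp [h, hc]
  | case2 i h hc ih => rw [rfA_skip]; simp [h, hc]; omega
  | case3 i h => rw [rfA_skip]; simp [h]

-- outer while over index i with accumulator `result`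
def rfA_go (cs : List Char) (i : Nat) (result : List String) : List String :=
  if h : i < cs.length then
    -- `input_str[i:i+2] == "s:"` — for 0 ≤ i ≤ len the slice is (cs.drop i).take 2 (exact)
    if (cs.drop i).take 2 = ['s', ':'] then
      rfA_go cs (rfA_skip cs (i + 2)) (result ++ ["s"])
    else
      rfA_go cs (i + 1) (result ++ [String.ofList [cs[i]]])
  else result
termination_by cs.length - i
decreasing_by
  · have := rfA_skip_ge cs (i + 2); omega
  · omega

def remove_features (input_str : String) : String :=
  PySem.Str.join "" (rfA_go input_str.toList 0 [])

-- ===== PORT B =====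
-- Hand port of `re.sub(r's:[^/()\\]*', 's', input_str)`: a left-to-right, non-overlapping,
-- maximal-munch scan — exactly CPython re.sub's semantics for this pattern.
def rfB : List Char → List Char
  | 's' :: ':' :: rest => 's' :: rfB (rest.dropWhile (fun c => ! rfDelim c))
  | c :: rest => c :: rfB rest
  | [] => []
termination_by cs => cs.length
decreasing_by
  · have := List.length_dropWhile_le (fun c => ! rfDelim c) rest
    simp; omega
  · simp

def remove_features_alt (input_str : String) : String :=
  String.ofList (rfB input_str.toList)

-- ===== PRECONDITION & SPEC =====
def Spec_remove_features (input_str : String) (out : String) : Prop := out = remove_features_alt input_str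
instance (input_str : String) (out : String) : Decidable (Spec_remove_features input_str out) := by unfold Spec_remove_features; infer_instance

-- ===== CLAIM (what is proved, stated in full; the proofs are below) =====
def Claim_equal_remove_features : Prop := ∀ (input_str : String), Dom_remove_features input_str → Spec_remove_features input_str (remove_features input_str)

-- ===== LEMMAS AND PROOFS =====

theorem rfB_cons (c : Char) (rest : List Char)
    (h : (c :: rest).take 2 ≠ ['s', ':']) : rfB (c :: rest) = c :: rfB rest := by
  cases rest with
  | nil => rw [rfB.eq_def]; split <;> simp_all
  | cons c2 r =>
    rw [rfB.eq_def]
    by_cases hc : c = 's'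
    · by_cases hc2 : c2 = ':'
      · exact absurd (by simp [hc, hc2]) h
      · subst hc; simp [hc2]
    · simp [hc]

theorem join_nil_flatten (l : List (List Char)) : PySem.Chars.join [] l = l.flatten := by
  induction l with
  | nil => rfl
  | cons a t ih =>
    cases t with
    | nil => simp [PySem.Chars.join_singleton]
    | cons b t2 => rw [PySem.Chars.join_cons_cons]; simp [ih]

theorem rfA_skip_drop (cs : List Char) (j : Nat) :
    cs.drop (rfA_skip cs j) = (cs.drop j).dropWhile (fun c => ! rfDelim c) := by
  induction j using rfA_skip.induct cs with
  | case1 j h hc =>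
    rw [rfA_skip, dif_pos h, if_pos hc]
    conv_rhs => rw [List.drop_eq_getElem_cons h]
    simp [List.dropWhile, hc]
  | case2 j h hc ih =>
    rw [rfA_skip, dif_pos h, if_neg hc, ih]
    conv_rhs => rw [List.drop_eq_getElem_cons h]
    simp only [Bool.not_eq_true] at hc
    simp [List.dropWhile, hc]
  | case3 j h =>
    rw [rfA_skip]
    simp only [not_lt] at h
    rw [dif_neg (by omega), List.drop_eq_nil_of_le h]
    rfl

theorem join_snoc (result : List String) (x : String) :
    PySem.Chars.join [] ((result ++ [x]).map String.toList)
      = PySem.Chars.join [] (result.map String.toList) ++ x.toList := by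
  simp [join_nil_flatten]

theorem rfA_go_join (cs : List Char) (i : Nat) (result : List String) :
    PySem.Chars.join [] ((rfA_go cs i result).map String.toList)
      = PySem.Chars.join [] (result.map String.toList) ++ rfB (cs.drop i) := by
  induction i, result using rfA_go.induct cs with
  | case1 i result h hs ih =>
    rw [rfA_go, dif_pos h, if_pos hs, ih, join_snoc]
    have hdrop : cs.drop i = 's' :: ':' :: cs.drop (i + 2) := by
      conv_lhs => rw [← List.take_append_drop 2 (cs.drop i)]
      rw [hs, List.drop_drop]
      rfl
    rw [hdrop, rfB, rfA_skip_drop]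
    simp
  | case2 i result h hs ih =>
    rw [rfA_go, dif_pos h, if_neg hs, ih, join_snoc]
    have hdrop : cs.drop i = cs[i] :: cs.drop (i + 1) := List.drop_eq_getElem_cons h
    rw [hdrop, rfB_cons _ _ (by rw [← hdrop]; exact hs)]
    simp
  | case3 i result h =>
    rw [rfA_go, dif_neg h]
    simp only [not_lt] at h
    rw [List.drop_eq_nil_of_le h]
    simp [rfB]

-- ===== VERDICT (by name: the statement is the Claim_ definition above) =====
theorem remove_features_spec : Claim_equal_remove_features := by
  intro input_str _
  unfold Spec_remove_features remove_features remove_features_alt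
  apply String.ext
  rw [PySem.Str.toList_join]
  have he : ("" : String).toList = ([] : List Char) := by simp
  rw [he, rfA_go_join]
  simp [PySem.Chars.join_nil]
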